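-- pv_equiv track=rewrite | github.com/ellastyko/num-methods | t07/app/main.py | convert
-- ===== SOURCE A (Python) =====
-- def convert(temp):
--     matrix, vector = [], []
--     for i in range(len(temp) - 1):
--         if temp[i] != '':
--             matrix += [temp[i].split(' ')]
--
--     for i in range(len(matrix)):
--         for j in range(len(matrix[i])):
--             matrix[i][j] = int(matrix[i][j])
--
--     for i in range(len(matrix)):
--         for j in range(len(matrix[i])):
--             if j == int(len(matrix[i]) - 1):
--                 vector.append(matrix[i][j])
--                 matrix[i].pop(j)
--
--     return matrix, vector
-- ===== SOURCE B (Python) =====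
-- def convert(temp):
--     # Single pass over temp[:-1]: split, int-convert and split off the last
--     # column per line at once, instead of A's three separate sweeps.
--     matrix, vector = [], []
--     for line in temp[:-1]:
--         if line != '':
--             row = [int(x) for x in line.split(' ')]
--             vector.append(row.pop())
--             matrix.append(row)
--     return matrix, vector
-- ===== Notes on version B (the rewrite author's own statement) =====
-- stated objective: simpler
-- what changed: B replaces A's three separate sweeps (index-loop collecting splits, nested in-place int-conversion loops, nested find-last-and-pop loops) with one direct pass over temp[:-1] that splits, converts and separates the last column per line at once.
import Mathlib
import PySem

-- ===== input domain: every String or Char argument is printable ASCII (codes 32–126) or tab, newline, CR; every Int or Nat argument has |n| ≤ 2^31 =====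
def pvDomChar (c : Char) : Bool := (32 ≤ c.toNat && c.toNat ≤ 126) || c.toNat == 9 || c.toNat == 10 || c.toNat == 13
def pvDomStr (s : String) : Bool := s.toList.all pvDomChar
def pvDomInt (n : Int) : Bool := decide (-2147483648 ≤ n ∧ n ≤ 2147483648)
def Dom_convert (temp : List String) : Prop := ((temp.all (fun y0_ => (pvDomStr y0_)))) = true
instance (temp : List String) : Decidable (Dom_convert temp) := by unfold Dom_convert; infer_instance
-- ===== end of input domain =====

-- B does one pass over temp[:-1] (split, int-convert, separate last column per line at once) instead of A's three sweeps; same cost, simpler.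

-- ===== PORT A =====
-- loop 1: indices from range(len(temp)-1) are always in range, so the pyGetD default "" is never used;
-- s.split(' ') is PySem.Str.split?, which is some since the separator " " is nonempty
def convertLoop1 (temp : List String) : List (List String) :=
  (PySem.List.pyRange 0 ((temp.length : Int) - 1) 1).foldl
    (fun m i =>
      let s := PySem.List.pyGetD temp i ""
      if s ≠ "" then m ++ [(PySem.Str.split? s " ").getD []] else m) []

-- loop 3's inner loop over j in range(len(matrix[i])); the body fires only at the last j,
-- which is always in range, so the pyGetD/pop? defaults are never used
def convertInner (row : List Int) : List Int × List Int :=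
  (List.range row.length).foldl
    (fun (rv : List Int × List Int) (j : Nat) =>
      if (j : Int) = (rv.1.length : Int) - 1 then
        let x := PySem.List.pyGetD rv.1 (j : Int) 0
        (((PySem.List.pop? rv.1 (j : Int)).map Prod.snd).getD rv.1, rv.2 ++ [x])
      else rv) (row, [])

def convert (temp : List String) : List (List Int) × List Int :=
  let matrix0 := convertLoop1 temp
  -- loop 2: matrix[i][j] = int(matrix[i][j]); the int() ValueError cases are excluded by Pre_
  let matrix1 : List (List Int) :=
    matrix0.map (fun row => row.map (fun s => (PySem.Int.ofStr? s).getD 0))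
  -- loop 3
  matrix1.foldl
    (fun (mv : List (List Int) × List Int) row =>
      let rv := convertInner row
      (mv.1 ++ [rv.1], mv.2 ++ rv.2)) ([], [])

-- ===== PORT B =====
def convert_alt (temp : List String) : List (List Int) × List Int :=
  (PySem.List.slice temp none (some (-1))).foldl
    (fun (mv : List (List Int) × List Int) line =>
      if line ≠ "" then
        let row := ((PySem.Str.split? line " ").getD []).map (fun x => (PySem.Int.ofStr? x).getD 0)
        match PySem.List.pop? row (-1) with
        | some (x, rest) => (mv.1 ++ [rest], mv.2 ++ [x])
        | none => mv  -- unreachable: split(' ') always yields a nonempty list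
      else mv) ([], [])

-- ===== PRECONDITION & SPEC =====
-- Pre_ excludes exactly the inputs on which the Python A raises ValueError: some non-empty line
-- among temp[:-1] containing a token that int() does not accept.
def Pre_convert (temp : List String) : Prop :=
  ∀ s ∈ temp.dropLast, s ≠ "" →
    ∀ t ∈ (PySem.Str.split? s " ").getD [], (PySem.Int.ofStr? t).isSome = true
instance (temp : List String) : Decidable (Pre_convert temp) := by unfold Pre_convert; infer_instance
def pvWitness_convert : List String := ["1 2 3", "", "4 5 6", "last"]

def Spec_convert (temp : List String) (out : List (List Int) × List Int) : Prop := out = convert_alt temp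
instance (temp : List String) (out : List (List Int) × List Int) : Decidable (Spec_convert temp out) := by unfold Spec_convert; infer_instance

-- ===== CLAIM (what is proved, stated in full; the proofs are below) =====
def Claim_equal_convert : Prop := ∀ (temp : List String), Dom_convert temp → Pre_convert temp → Spec_convert temp (convert temp)

-- ===== LEMMAS AND PROOFS =====

-- abbreviations used only by the proofs
def pvToks (s : String) : List String := (PySem.Str.split? s " ").getD []
def pvConv (s : String) : List Int := (pvToks s).map (fun x => (PySem.Int.ofStr? x).getD 0)

theorem pv_go_ne_nil (sep : List Char) :
    ∀ (fuel : Nat) (l cur : List Char) (acc : List (List Char)),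
      PySem.Chars.splitOn.go sep fuel l cur acc ≠ [] := by
  intro fuel
  induction fuel with
  | zero => intro l cur acc; rw [PySem.Chars.splitOn.go.eq_def]; simp
  | succ n ih =>
    intro l cur acc
    cases l with
    | nil => rw [PySem.Chars.splitOn.go.eq_def]; simp
    | cons c rest =>
      rw [PySem.Chars.splitOn.go.eq_def]
      dsimp only
      split
      · exact ih _ _ _
      · exact ih _ _ _

theorem pvToks_ne_nil (s : String) : pvToks s ≠ [] := by
  unfold pvToks PySem.Str.split?
  have h : PySem.Chars.split? s.toList " ".toList = some (PySem.Chars.splitOn s.toList " ".toList) := by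
    unfold PySem.Chars.split?; rfl
  rw [h]
  simp [PySem.Chars.splitOn]
  exact pv_go_ne_nil _ _ _ _ _

theorem pvConv_ne_nil (s : String) : pvConv s ≠ [] := by
  unfold pvConv
  simpa using pvToks_ne_nil s

-- loop 1 collects the splits of the non-empty lines of temp[:-1]
theorem pv_foldl_if_append {α β : Type} (p : α → Prop) [DecidablePred p] (f : α → β) :
    ∀ (l : List α) (acc : List β),
      l.foldl (fun m x => if p x then m ++ [f x] else m) acc
        = acc ++ (l.filter (fun x => decide (p x))).map f := by
  intro l
  induction l with
  | nil => intro acc; simp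
  | cons a t ih =>
    intro acc
    by_cases h : p a <;> simp [h, ih]

theorem pv_loop1_eq (temp : List String) :
    convertLoop1 temp = (temp.dropLast.filter (fun s => decide (s ≠ ""))).map pvToks := by
  unfold convertLoop1
  cases temp with
  | nil => rfl
  | cons a t =>
    have hlen : ((a :: t).length : Int) - 1 = (((a :: t).dropLast).length : Int) := by
      simp
    rw [hlen]
    have hcongr :
        (PySem.List.pyRange 0 ((((a :: t).dropLast).length : Int)) 1).foldl
          (fun m i =>
            let s := PySem.List.pyGetD (a :: t) i ""
            if s ≠ "" then m ++ [pvToks s] else m) []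
          = (PySem.List.pyRange 0 ((((a :: t).dropLast).length : Int)) 1).foldl
          (fun m i =>
            let s := PySem.List.pyGetD ((a :: t).dropLast) i ""
            if s ≠ "" then m ++ [pvToks s] else m) [] := by
      apply PySem.List.foldl_congr_mem
      intro acc x hx
      have hb := PySem.List.mem_pyRange_one.mp hx
      have hx0 : 0 ≤ x := hb.1
      have hxl : x < (((a :: t).dropLast).length : Int) := hb.2
      have hxn : x = ((x.toNat : Nat) : Int) := by omega
      rw [hxn, PySem.List.pyGetD_natCast, PySem.List.pyGetD_natCast]
      have hlt : x.toNat < ((a :: t).dropLast).length := by omega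
      have hlt2 : x.toNat < (a :: t).length := by
        have h := @List.length_dropLast _ (a :: t); omega
      simp only [List.getD_eq_getElem?_getD, List.getElem?_eq_getElem hlt,
        List.getElem?_eq_getElem hlt2, List.getElem_dropLast]
    simp only [pvToks] at hcongr ⊢
    rw [hcongr, PySem.List.foldl_pyRange_zero_pyGetD' ((a :: t).dropLast) ""
      (fun m s => if s ≠ "" then m ++ [(PySem.Str.split? s " ").getD []] else m) []]
    have := pv_foldl_if_append (fun s : String => s ≠ "")
      (fun s => (PySem.Str.split? s " ").getD []) ((a :: t).dropLast) []
    simpa using this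

-- the inner loop of loop 3 leaves the state untouched until the last index
theorem pv_inner_keep (v : List Int) (L : List Int) :
    ∀ (js : List Nat), (∀ j ∈ js, ((j : Int) ≠ (L.length : Int) - 1)) →
      js.foldl
        (fun (rv : List Int × List Int) (j : Nat) =>
          if (j : Int) = (rv.1.length : Int) - 1 then
            let x := PySem.List.pyGetD rv.1 (j : Int) 0
            (((PySem.List.pop? rv.1 (j : Int)).map Prod.snd).getD rv.1, rv.2 ++ [x])
          else rv) (L, v) = (L, v) := by
  intro js
  induction js with
  | nil => intro _; rfl
  | cons j t ih =>
    intro h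
    have hj : ((j : Int) ≠ (L.length : Int) - 1) := h j (by simp)
    simp only [List.foldl_cons]
    rw [if_neg hj]
    exact ih (fun x hx => h x (by simp [hx]))

theorem pv_eraseIdx_concat (xs : List Int) (y : Int) :
    (xs ++ [y]).eraseIdx xs.length = xs := by
  induction xs with
  | nil => rfl
  | cons a t ih => simpa using ih

theorem pv_inner_eq (xs : List Int) (y : Int) :
    convertInner (xs ++ [y]) = (xs, [y]) := by
  unfold convertInner
  have hlen : (xs ++ [y]).length = xs.length + 1 := by simp
  rw [hlen, List.range_succ, List.foldl_append]
  rw [pv_inner_keep [] (xs ++ [y]) (List.range xs.length)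
    (by intro j hj; have := List.mem_range.mp hj; simp; omega)]
  simp only [List.foldl_cons, List.foldl_nil]
  have hcond : ((xs.length : Nat) : Int) = (((xs ++ [y]).length : Nat) : Int) - 1 := by
    simp
  rw [if_pos hcond]
  have hget : PySem.List.pyGetD (xs ++ [y]) ((xs.length : Nat) : Int) 0 = y := by
    rw [PySem.List.pyGetD_natCast]
    simp [List.getD_eq_getElem?_getD]
  have hlt : xs.length < (xs ++ [y]).length := by simp
  have hpop : PySem.List.pop? (xs ++ [y]) ((xs.length : Nat) : Int)
      = some ((xs ++ [y])[xs.length], (xs ++ [y]).eraseIdx xs.length) :=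
    PySem.List.pop?_natCast _ _ hlt
  rw [hget, hpop]
  simp [pv_eraseIdx_concat]

-- the single pass of B computes A's three sweeps
theorem pv_main (lines : List String) :
    ∀ (mv : List (List Int) × List Int),
      lines.foldl
        (fun (mv : List (List Int) × List Int) line =>
          if line ≠ "" then
            match PySem.List.pop? (pvConv line) (-1) with
            | some (x, rest) => (mv.1 ++ [rest], mv.2 ++ [x])
            | none => mv
          else mv) mv
      = ((lines.filter (fun s => decide (s ≠ ""))).map pvConv).foldl
          (fun (mv : List (List Int) × List Int) row =>
            (mv.1 ++ [(convertInner row).1], mv.2 ++ (convertInner row).2)) mv := by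
  induction lines with
  | nil => intro mv; rfl
  | cons s t ih =>
    intro mv
    by_cases h : s = ""
    · subst h; simpa using ih mv
    · rcases List.eq_nil_or_concat (pvConv s) with hnil | ⟨xs, y, hxy⟩
      · exact absurd hnil (pvConv_ne_nil s)
      · simp only [List.concat_eq_append] at hxy
        rw [List.foldl_cons, if_pos h, hxy, PySem.List.pop?_last,
          List.filter_cons_of_pos (by simpa using h), List.map_cons, List.foldl_cons,
          hxy, pv_inner_eq]
        exact ih _

theorem convert_eq (temp : List String) : convert temp = convert_alt temp := by
  show ((convertLoop1 temp).map (fun row => row.map (fun s => (PySem.Int.ofStr? s).getD 0))).foldl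
      (fun (mv : List (List Int) × List Int) row =>
        (mv.1 ++ [(convertInner row).1], mv.2 ++ (convertInner row).2)) ([], [])
    = (PySem.List.slice temp none (some (-1))).foldl
      (fun (mv : List (List Int) × List Int) line =>
        if line ≠ "" then
          match PySem.List.pop?
            (((PySem.Str.split? line " ").getD []).map (fun x => (PySem.Int.ofStr? x).getD 0)) (-1) with
          | some (x, rest) => (mv.1 ++ [rest], mv.2 ++ [x])
          | none => mv
        else mv) ([], [])
  rw [PySem.List.slice_to_neg_one, pv_loop1_eq, List.map_map]
  have h2 : ((fun row : List String => row.map fun s => (PySem.Int.ofStr? s).getD 0) ∘ pvToks)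
      = pvConv := by
    funext s; rfl
  rw [h2]
  have h3 := pv_main temp.dropLast ([], [])
  simp only [pvConv, pvToks] at h3
  exact h3.symm

-- ===== VERDICT (by name: the statement is the Claim_ definition above) =====
theorem convert_spec : Claim_equal_convert := by
  intro temp _ _
  unfold Spec_convert
  exact convert_eq temp
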